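-- pv_equiv track=rewrite | github.com/Ucanek/Blocking-game | Game/game.py | strategy_min_block
-- ===== SOURCE A (Python) =====
-- from typing import List, Tuple, Callable
--
-- Playground = List[List[bool]] # Definujeme typ Playground, což bude vždy pole polí boolů
--
-- def strategy_min_block(playground: Playground) -> Tuple[int, int]:
--
--     """
--     Minimálně blokující strategie. Vrátí souřadnice, na která se má hrát.
--     """
--     playground_height = len(playground)
--     playground_width = len(playground[0])
--     for _ in range(4):
--         for y in range(len(playground)):
--             for x in range(len(playground[0])):
--                 h = 0
--                 if playground[int(y)][int(x)] == False:
--                     h += 1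
--                 if int(y)+1 < playground_height:
--                     if playground[int(y)+1][int(x)] == False:
--                         h += 1
--                 if int(y)-1 >= 0:
--                     if playground[int(y)-1][int(x)] == False:
--                         h += 1
--                 if int(x)+1 < playground_width:
--                     if playground[int(y)][int(x)+1] == False:
--                         h += 1
--                 if int(x)-1 >= 0:
--                     if playground[int(y)][int(x)-1] == False:
--                         h += 1
--                 if h == _+1:
--                     return (str(y), str(x))
-- ===== SOURCE B (Python) =====
-- def strategy_min_block(playground):
--     """Single-pass running minimum instead of four full grid scans with early return."""
--     height = len(playground)
--     width = len(playground[0])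
--     best = None  # (h, position)
--     for y in range(height):
--         for x in range(width):
--             h = sum(1 for (yy, xx) in ((y, x), (y + 1, x), (y - 1, x), (y, x + 1), (y, x - 1))
--                     if 0 <= yy < height and 0 <= xx < width and not playground[yy][xx])
--             if 1 <= h <= 4 and (best is None or h < best[0]):
--                 best = (h, (str(y), str(x)))
--     return best[1] if best is not None else None
-- ===== Notes on version B (the rewrite author's own statement) =====
-- stated objective: simpler
-- what changed: A scans the whole grid up to four times, once per target count h=1..4, returning the first cell whose free-neighbour count equals the target; B makes a single row-major pass keeping a running minimum (h, first position) over cells with 1<=h<=4 and counts free neighbours with one generator over the five candidate coordinates instead of five if-chains.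
-- outside the precondition, e.g. on strategy_min_block([[True, True], [False]]): A returns ('0', '0'), B raises IndexError
import Mathlib
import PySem

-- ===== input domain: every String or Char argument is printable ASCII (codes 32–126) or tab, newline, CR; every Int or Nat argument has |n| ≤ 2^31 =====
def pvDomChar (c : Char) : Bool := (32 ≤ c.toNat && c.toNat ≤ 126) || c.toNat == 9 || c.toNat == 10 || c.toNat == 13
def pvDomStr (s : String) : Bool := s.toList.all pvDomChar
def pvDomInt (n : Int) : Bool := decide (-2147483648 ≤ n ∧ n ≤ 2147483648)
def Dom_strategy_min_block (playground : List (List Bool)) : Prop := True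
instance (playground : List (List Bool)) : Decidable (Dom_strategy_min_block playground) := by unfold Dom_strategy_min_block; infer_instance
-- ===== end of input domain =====

-- B replaces A's four full grid scans (one per target count 1..4, first hit returned)
-- by a single row-major pass keeping a running minimum; objective: simpler.

-- ===== PORT A =====
-- playground[y][x]; default never reached on Pre_ inputs (all indices guarded/in range there)
def pvGetCell (pg : List (List Bool)) (y x : Int) : Bool :=
  (PySem.List.pyGet? ((PySem.List.pyGet? pg y).getD []) x).getD true

-- A's h: the five guarded `if ... == False: h += 1` steps, in A's order
def pvH_A (pg : List (List Bool)) (H W : Int) (y x : Int) : Int :=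
  let h : Int := 0
  let h := if pvGetCell pg y x = false then h + 1 else h
  let h := if y + 1 < H then (if pvGetCell pg (y + 1) x = false then h + 1 else h) else h
  let h := if y - 1 ≥ 0 then (if pvGetCell pg (y - 1) x = false then h + 1 else h) else h
  let h := if x + 1 < W then (if pvGetCell pg y (x + 1) = false then h + 1 else h) else h
  let h := if x - 1 ≥ 0 then (if pvGetCell pg y (x - 1) = false then h + 1 else h) else h
  h

def strategy_min_block (playground : List (List Bool)) : Option (String × String) :=
  let H : Int := playground.length
  let W : Int := (playground.headD []).length
  (List.range 4).findSome? fun (t : Nat) =>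
    (List.range playground.length).findSome? fun (y : Nat) =>
      (List.range (playground.headD []).length).findSome? fun (x : Nat) =>
        if pvH_A playground H W (y : Int) (x : Int) = (t : Int) + 1
        then some (PySem.Int.toStr (y : Int), PySem.Int.toStr (x : Int)) else none

-- ===== PORT B =====
-- B's h: sum over the five candidate coordinates with a full bounds check
def pvH_B (pg : List (List Bool)) (H W : Int) (y x : Int) : Int :=
  [(y, x), (y + 1, x), (y - 1, x), (y, x + 1), (y, x - 1)].foldl
    (fun (s : Int) c =>
      if 0 ≤ c.1 ∧ c.1 < H ∧ 0 ≤ c.2 ∧ c.2 < W ∧ pvGetCell pg c.1 c.2 = false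
      then s + 1 else s) 0

-- B's running-minimum update: `if 1 <= h <= 4 and (best is None or h < best[0])`
def pvBetter (acc : Option (Int × (String × String))) (h : Int) : Bool :=
  match acc with | none => true | some b => h < b.1

def pvStep (acc : Option (Int × (String × String))) (e : Int × (String × String)) :
    Option (Int × (String × String)) :=
  if 1 ≤ e.1 ∧ e.1 ≤ 4 ∧ pvBetter acc e.1 = true then some e else acc

def strategy_min_block_alt (playground : List (List Bool)) : Option (String × String) :=
  let H : Int := playground.length
  let W : Int := (playground.headD []).length
  let best := (List.range playground.length).foldl (fun acc (y : Nat) =>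
    (List.range (playground.headD []).length).foldl (fun acc (x : Nat) =>
      pvStep acc (pvH_B playground H W (y : Int) (x : Int),
        (PySem.Int.toStr (y : Int), PySem.Int.toStr (x : Int)))) acc) none
  best.map Prod.snd

-- ===== PRECONDITION & SPEC =====
-- Pre_ excludes empty grids and ragged grids with a row shorter than the first row: there both
-- programs hit IndexError unless A's early return happens to fire first, an accident of A's
-- scan order that B (which always finishes its single pass) cannot and should not reproduce.
def Pre_strategy_min_block (playground : List (List Bool)) : Prop :=
  playground ≠ [] ∧ ∀ row ∈ playground, (playground.headD []).length ≤ row.length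

instance (playground : List (List Bool)) : Decidable (Pre_strategy_min_block playground) := by
  unfold Pre_strategy_min_block; infer_instance

def pvWitness_strategy_min_block : List (List Bool) := [[false, true], [true, true]]

def Spec_strategy_min_block (playground : List (List Bool)) (out : Option (String × String)) : Prop :=
  out = strategy_min_block_alt playground
instance (playground : List (List Bool)) (out : Option (String × String)) :
    Decidable (Spec_strategy_min_block playground out) := by
  unfold Spec_strategy_min_block; infer_instance

-- ===== CLAIM (what is proved, stated in full; the proofs are below) =====
def Claim_equal_strategy_min_block : Prop :=
  ∀ (playground : List (List Bool)), Dom_strategy_min_block playground →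
    Pre_strategy_min_block playground →
    Spec_strategy_min_block playground (strategy_min_block playground)

-- ===== LEMMAS AND PROOFS =====

-- first element of L (h-value × payload) whose h lies in [lo, hi) and is minimal there
def pvM {α : Type} (lo hi : Int) : List (Int × α) → Option (Int × α)
  | [] => none
  | e :: L =>
    if lo ≤ e.1 ∧ e.1 < hi then
      match pvM lo hi L with
      | none => some e
      | some b => if b.1 < e.1 then some b else some e
    else pvM lo hi L

-- A's search shape: try target t, then t+1, …, k targets in all
def pvF {α : Type} : Nat → Int → List (Int × α) → Option α
  | 0, _, _ => none
  | k + 1, t, L => ((L.find? (fun e => e.1 == t)).map Prod.snd).orElse (fun _ => pvF k (t + 1) L)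

def pvComb {α : Type} (a b : Option (Int × α)) : Option (Int × α) :=
  match a, b with
  | none, b => b
  | some a, none => some a
  | some a, some b => if b.1 < a.1 then some b else some a

theorem pvF_nil {α : Type} (k : Nat) (t : Int) : pvF k t ([] : List (Int × α)) = none := by
  induction k generalizing t with
  | zero => rfl
  | succ k ih => simp [pvF, ih]

theorem pvF_skip {α : Type} (k : Nat) (t : Int) (e : Int × α) (L : List (Int × α))
    (h : e.1 < t ∨ t + k ≤ e.1) : pvF k t (e :: L) = pvF k t L := by
  induction k generalizing t with
  | zero => rfl
  | succ k ih =>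
    have hne : (e.1 == t) = false := by simp; omega
    simp only [pvF, List.find?_cons, hne]
    rw [ih (t + 1) (by omega)]

theorem pvF_hit {α : Type} (k : Nat) (t : Int) (e : Int × α) (L : List (Int × α))
    (h1 : t ≤ e.1) (h2 : e.1 < t + k) :
    pvF k t (e :: L) = (pvF (e.1 - t).toNat t L).orElse (fun _ => some e.2) := by
  induction k generalizing t with
  | zero => omega
  | succ k ih =>
    by_cases he : e.1 = t
    · have : (e.1 - t).toNat = 0 := by omega
      simp [pvF, List.find?_cons, he, this, Option.orElse]
    · have hne : (e.1 == t) = false := by simp; omega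
      have hd : (e.1 - t).toNat = (e.1 - (t + 1)).toNat + 1 := by omega
      simp only [pvF, List.find?_cons, hne]
      rw [ih (t + 1) (by omega) (by omega), hd]
      simp only [pvF]
      cases L.find? (fun x => x.1 == t) <;> cases pvF (e.1 - (t + 1)).toNat (t + 1) L <;>
        simp [Option.orElse]

theorem pvM_restrict {α : Type} (lo m hi : Int) (L : List (Int × α))
    (h1 : lo ≤ m) (h2 : m ≤ hi) :
    pvM lo m L = (match pvM lo hi L with
      | none => none
      | some b => if b.1 < m then some b else none) := by
  induction L with
  | nil => rfl
  | cons e L ih =>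
    simp only [pvM]
    by_cases hw : lo ≤ e.1 ∧ e.1 < hi
    · by_cases hn : e.1 < m
      · simp only [hw, and_true, if_pos (show lo ≤ e.1 ∧ e.1 < m from ⟨hw.1, hn⟩), if_pos hw, ih]
        cases hM : pvM lo hi L with
        | none => simp [hn]
        | some b => by_cases hb : b.1 < m <;> by_cases hb2 : b.1 < e.1 <;>
            simp [hb, hb2, hn] <;> omega
      · have : ¬ (lo ≤ e.1 ∧ e.1 < m) := by omega
        simp only [if_neg this, if_pos hw, ih]
        cases hM : pvM lo hi L with
        | none => simp [hn]
        | some b => by_cases hb : b.1 < m <;> by_cases hb2 : b.1 < e.1 <;>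
            simp [hb, hb2, hn] <;> omega
    · have : ¬ (lo ≤ e.1 ∧ e.1 < m) := by omega
      simp only [if_neg this, if_neg hw, ih]

theorem pvFM {α : Type} (L : List (Int × α)) :
    ∀ (k : Nat) (t : Int), pvF k t L = (pvM t (t + k) L).map Prod.snd := by
  induction L with
  | nil => intro k t; rw [pvF_nil]; rfl
  | cons e L ih =>
    intro k t
    by_cases hw : t ≤ e.1 ∧ e.1 < t + k
    · rw [pvF_hit k t e L hw.1 hw.2, ih]
      have hm : pvM t e.1 L = (match pvM t (t + k) L with
          | none => none
          | some b => if b.1 < e.1 then some b else none) :=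
        pvM_restrict t e.1 (t + k) L hw.1 (by omega)
      have ht : t + ((e.1 - t).toNat : Int) = e.1 := by omega
      rw [ht, hm]
      simp only [pvM, if_pos hw]
      cases pvM t (t + k) L with
      | none => simp [Option.orElse]
      | some b => by_cases hb : b.1 < e.1 <;> simp [hb, Option.orElse]
    · rw [pvF_skip k t e L (by omega), ih]
      simp only [pvM]
      rw [if_neg (by omega)]

theorem pvFoldM (L : List (Int × (String × String))) :
    ∀ acc, L.foldl pvStep acc = pvComb acc (pvM 1 5 L) := by
  induction L with
  | nil => intro acc; cases acc <;> rfl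
  | cons e L ih =>
    intro acc
    rw [List.foldl_cons, ih]
    simp only [pvM, pvStep]
    by_cases hw : 1 ≤ e.1 ∧ e.1 < 5
    · rw [if_pos hw]
      cases acc with
      | none =>
        rw [if_pos (by simp [pvBetter]; omega)]
        cases pvM 1 5 L with
        | none => rfl
        | some b => by_cases hb : b.1 < e.1 <;> simp [pvComb, hb]
      | some a =>
        by_cases ha : e.1 < a.1
        · rw [if_pos (by simp [pvBetter]; omega)]
          cases pvM 1 5 L with
          | none => simp [pvComb, ha]
          | some b =>
            by_cases hb : b.1 < e.1
            · have hba : b.1 < a.1 := by omega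
              simp [pvComb, hb, hba]
            · simp [pvComb, hb, ha]
        · rw [if_neg (by simp [pvBetter]; omega)]
          cases pvM 1 5 L with
          | none => simp [pvComb, ha]
          | some b =>
            by_cases hb : b.1 < e.1
            · simp [pvComb, hb]
            · have hba : ¬ b.1 < a.1 := by omega
              simp [pvComb, hb, hba, ha]
    · rw [if_neg (by omega)]
      cases acc with
      | none => rw [if_neg (by simp [pvBetter]; omega)]
      | some a => rw [if_neg (by simp [pvBetter]; omega)]

-- inner x-loop of A = find? over the mapped row
theorem pvFind_row {α : Type} (xs : List Nat) (g : Nat → Int) (p : Nat → α) (t : Int) :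
    xs.findSome? (fun (x : Nat) => if g x = t then some (p x) else none) =
      ((xs.map (fun (x : Nat) => (g x, p x))).find? (fun e => e.1 == t)).map Prod.snd := by
  induction xs with
  | nil => rfl
  | cons x xs ih =>
    simp only [List.findSome?_cons, List.map_cons, List.find?_cons]
    by_cases hx : g x = t
    · simp [hx]
    · have hbe : (((g x, p x) : Int × α).1 == t) = false := by simp [hx]
      simp only [if_neg hx, hbe, cond_false, Bool.false_eq_true, if_false]
      exact ih

-- A's nested loops = find? over the flattened grid
theorem pvFind_grid {α : Type} (ys : List Nat) (W : Nat) (g : Nat → Nat → Int)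
    (p : Nat → Nat → α) (t : Int) :
    ys.findSome? (fun (y : Nat) => (List.range W).findSome? (fun (x : Nat) =>
        if g y x = t then some (p y x) else none)) =
      ((ys.flatMap (fun (y : Nat) => (List.range W).map (fun (x : Nat) =>
        (g y x, p y x)))).find? (fun e => e.1 == t)).map Prod.snd := by
  induction ys with
  | nil => rfl
  | cons y ys ih =>
    simp only [List.findSome?_cons, List.flatMap_cons, List.find?_append]
    rw [pvFind_row (List.range W) (g y) (p y) t, ih]
    cases ((List.range W).map (fun (x : Nat) => (g y x, p y x))).find? (fun e => e.1 == t) <;>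
      simp [Option.orElse]

-- B's nested folds = one fold over the flattened grid
theorem pvFold_grid {α β : Type} (ys : List Nat) (W : Nat) (g : Nat → Nat → Int)
    (p : Nat → Nat → β) (s : α → (Int × β) → α) (a0 : α) :
    ys.foldl (fun acc (y : Nat) => (List.range W).foldl (fun acc (x : Nat) =>
        s acc (g y x, p y x)) acc) a0 =
      (ys.flatMap (fun (y : Nat) => (List.range W).map (fun (x : Nat) =>
        (g y x, p y x)))).foldl s a0 := by
  induction ys generalizing a0 with
  | nil => rfl
  | cons y ys ih =>
    simp only [List.flatMap_cons, List.foldl_append, List.foldl_cons, List.foldl_map, ih]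

theorem pvIfIf {P Q : Prop} [Decidable P] [Decidable Q] {a b : Int} :
    (if P then (if Q then b else a) else a) = if P ∧ Q then b else a := by
  split_ifs <;> tauto

-- A's and B's neighbour counts agree on every in-range cell
theorem pvH_eq (pg : List (List Bool)) (y x : Nat)
    (hy : y < pg.length) (hx : x < (pg.headD []).length) :
    pvH_A pg pg.length (pg.headD []).length (y : Int) (x : Int) =
      pvH_B pg pg.length (pg.headD []).length (y : Int) (x : Int) := by
  have h1 : (0 ≤ (y : Int) ∧ (y : Int) < (pg.length : Int) ∧ 0 ≤ (x : Int) ∧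
        (x : Int) < ((pg.headD []).length : Int) ∧ pvGetCell pg (y : Int) (x : Int) = false) ↔
      (pvGetCell pg (y : Int) (x : Int) = false) :=
    ⟨fun h => h.2.2.2.2, fun h => ⟨by omega, by omega, by omega, by omega, h⟩⟩
  have h2 : (0 ≤ (y : Int) + 1 ∧ (y : Int) + 1 < (pg.length : Int) ∧ 0 ≤ (x : Int) ∧
        (x : Int) < ((pg.headD []).length : Int) ∧ pvGetCell pg ((y : Int) + 1) (x : Int) = false) ↔
      ((y : Int) + 1 < (pg.length : Int) ∧ pvGetCell pg ((y : Int) + 1) (x : Int) = false) :=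
    ⟨fun h => ⟨h.2.1, h.2.2.2.2⟩, fun h => ⟨by omega, h.1, by omega, by omega, h.2⟩⟩
  have h3 : (0 ≤ (y : Int) - 1 ∧ (y : Int) - 1 < (pg.length : Int) ∧ 0 ≤ (x : Int) ∧
        (x : Int) < ((pg.headD []).length : Int) ∧ pvGetCell pg ((y : Int) - 1) (x : Int) = false) ↔
      ((y : Int) - 1 ≥ 0 ∧ pvGetCell pg ((y : Int) - 1) (x : Int) = false) :=
    ⟨fun h => ⟨h.1, h.2.2.2.2⟩, fun h => ⟨h.1, by omega, by omega, by omega, h.2⟩⟩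
  have h4 : (0 ≤ (y : Int) ∧ (y : Int) < (pg.length : Int) ∧ 0 ≤ (x : Int) + 1 ∧
        (x : Int) + 1 < ((pg.headD []).length : Int) ∧ pvGetCell pg (y : Int) ((x : Int) + 1) = false) ↔
      ((x : Int) + 1 < ((pg.headD []).length : Int) ∧ pvGetCell pg (y : Int) ((x : Int) + 1) = false) :=
    ⟨fun h => ⟨h.2.2.2.1, h.2.2.2.2⟩, fun h => ⟨by omega, by omega, by omega, h.1, h.2⟩⟩
  have h5 : (0 ≤ (y : Int) ∧ (y : Int) < (pg.length : Int) ∧ 0 ≤ (x : Int) - 1 ∧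
        (x : Int) - 1 < ((pg.headD []).length : Int) ∧ pvGetCell pg (y : Int) ((x : Int) - 1) = false) ↔
      ((x : Int) - 1 ≥ 0 ∧ pvGetCell pg (y : Int) ((x : Int) - 1) = false) :=
    ⟨fun h => ⟨h.2.2.1, h.2.2.2.2⟩, fun h => ⟨by omega, by omega, h.1, by omega, h.2⟩⟩
  simp only [pvH_A, pvH_B, List.foldl, pvIfIf, h1, h2, h3, h4, h5]

-- the flattened grid with A's h-values
def pvCells (pg : List (List Bool)) : List (Int × (String × String)) :=
  (List.range pg.length).flatMap (fun (y : Nat) =>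
    (List.range (pg.headD []).length).map (fun (x : Nat) =>
      (pvH_A pg pg.length (pg.headD []).length (y : Int) (x : Int),
        (PySem.Int.toStr (y : Int), PySem.Int.toStr (x : Int)))))

theorem pvA_eq_F (pg : List (List Bool)) :
    strategy_min_block pg = pvF 4 1 (pvCells pg) := by
  have hgrid : ∀ t : Int,
      (List.range pg.length).findSome? (fun (y : Nat) =>
        (List.range (pg.headD []).length).findSome? (fun (x : Nat) =>
          if pvH_A pg pg.length (pg.headD []).length (y : Int) (x : Int) = t
          then some (PySem.Int.toStr (y : Int), PySem.Int.toStr (x : Int)) else none)) =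
      ((pvCells pg).find? (fun e => e.1 == t)).map Prod.snd := fun t =>
    pvFind_grid (List.range pg.length) (pg.headD []).length _ _ t
  simp only [strategy_min_block]
  rw [show List.range 4 = [0, 1, 2, 3] from rfl]
  simp only [List.findSome?_cons, List.findSome?_nil]
  rw [show ((0 : Nat) : Int) + 1 = 1 from rfl, show ((1 : Nat) : Int) + 1 = 2 from rfl,
    show ((2 : Nat) : Int) + 1 = 3 from rfl, show ((3 : Nat) : Int) + 1 = 4 from rfl]
  rw [hgrid 1, hgrid 2, hgrid 3, hgrid 4]
  simp only [pvF, pvF_nil]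
  rw [show (1 : Int) + 1 = 2 from rfl, show (2 : Int) + 1 = 3 from rfl,
    show (3 : Int) + 1 = 4 from rfl]
  cases h1 : (pvCells pg).find? (fun e => e.1 == 1) <;>
    cases h2 : (pvCells pg).find? (fun e => e.1 == 2) <;>
    cases h3 : (pvCells pg).find? (fun e => e.1 == 3) <;>
    cases h4 : (pvCells pg).find? (fun e => e.1 == 4) <;>
    simp [Option.orElse]

theorem pvB_eq_M (pg : List (List Bool)) :
    strategy_min_block_alt pg = ((pvCells pg).foldl pvStep none).map Prod.snd := by
  show ((List.range pg.length).foldl _ none).map Prod.snd = _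
  congr 1
  refine Eq.trans (PySem.List.foldl_congr_mem (List.range pg.length)
    (fun acc (y : Nat) =>
      (List.range (pg.headD []).length).foldl (fun acc (x : Nat) =>
        pvStep acc (pvH_B pg pg.length (pg.headD []).length (y : Int) (x : Int),
          (PySem.Int.toStr (y : Int), PySem.Int.toStr (x : Int)))) acc)
    (fun acc (y : Nat) =>
      (List.range (pg.headD []).length).foldl (fun acc (x : Nat) =>
        pvStep acc (pvH_A pg pg.length (pg.headD []).length (y : Int) (x : Int),
          (PySem.Int.toStr (y : Int), PySem.Int.toStr (x : Int)))) acc)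
    none
    (fun acc y hy => PySem.List.foldl_congr_mem (List.range (pg.headD []).length)
      _ _ acc (fun acc2 x hx => by
        rw [pvH_eq pg y x (List.mem_range.mp hy) (List.mem_range.mp hx)]))) ?_
  exact pvFold_grid (List.range pg.length) (pg.headD []).length _ _ pvStep none

-- ===== VERDICT (by name: the statement is the Claim_ definition above) =====
theorem strategy_min_block_spec : Claim_equal_strategy_min_block := by
  intro pg _ _
  show strategy_min_block pg = strategy_min_block_alt pg
  rw [pvA_eq_F, pvB_eq_M, pvFoldM (pvCells pg) none]
  have : pvComb none (pvM 1 5 (pvCells pg)) = pvM 1 5 (pvCells pg) := by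
    cases pvM 1 5 (pvCells pg) <;> rfl
  rw [this, pvFM (pvCells pg) 4 1]
  norm_num
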